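-- pv_equiv track=rewrite | github.com/vzhovtan/coding_interview_prep_examples | array_find_number_subarrays_with_all_elements_less_then_given_value.py | get_sub_array_sizes
-- ===== SOURCE A (Python) =====
-- def get_sub_array_sizes(a: [int], k: int):
--     sub_size = 0
--     for v in a:
--         if v < k:
--             sub_size += 1
--         else:
--             if sub_size > 0:
--                 yield sub_size
--             sub_size = 0
--
--     if sub_size > 0:
--         yield sub_size
-- ===== SOURCE B (Python) =====
-- def get_sub_array_sizes(a, k):
--     # run scanner: find each maximal run of values < k directly, no running counter
--     i, n = 0, len(a)
--     while i < n:
--         if a[i] < k: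
--             j = i
--             while j < n and a[j] < k:
--                 j += 1
--             yield j - i
--             i = j
--         else:
--             i += 1
-- ===== Notes on version B (the rewrite author's own statement) =====
-- stated objective: alternative
-- what changed: Replaces the running-counter state machine with per-yield reset and post-loop flush by a two-pointer run scanner that locates each maximal run of values below k and yields its length directly.
import Mathlib
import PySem

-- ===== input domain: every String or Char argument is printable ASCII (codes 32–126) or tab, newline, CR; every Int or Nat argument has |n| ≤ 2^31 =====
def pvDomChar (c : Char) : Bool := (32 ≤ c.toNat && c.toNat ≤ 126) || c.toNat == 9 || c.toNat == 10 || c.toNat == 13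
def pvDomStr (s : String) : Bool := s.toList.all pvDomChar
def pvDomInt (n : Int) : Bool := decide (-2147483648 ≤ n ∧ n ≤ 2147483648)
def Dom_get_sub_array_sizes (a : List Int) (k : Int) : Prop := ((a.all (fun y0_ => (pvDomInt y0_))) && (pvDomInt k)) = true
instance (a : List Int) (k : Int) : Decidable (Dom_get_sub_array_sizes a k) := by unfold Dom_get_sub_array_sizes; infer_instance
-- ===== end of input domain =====

-- B replaces A's running-counter state machine by a two-pointer run scanner (alternative decomposition, same cost).

-- ===== PORT A =====
-- A: for-loop with running counter sub_size, yields at a boundary and flushes after the loop.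
def goA_get_sub_array_sizes (k : Int) : List Int → Int → List Int
  | [], sub_size => if sub_size > 0 then [sub_size] else []
  | v :: rest, sub_size =>
      if v < k then goA_get_sub_array_sizes k rest (sub_size + 1)
      else if sub_size > 0 then sub_size :: goA_get_sub_array_sizes k rest 0
      else goA_get_sub_array_sizes k rest 0

def get_sub_array_sizes (a : List Int) (k : Int) : List Int :=
  goA_get_sub_array_sizes k a 0

-- ===== PORT B =====
-- B: scan for the start of a run; the inner 'while a[j] < k' is the takeWhile count, then skip past the run.
def goB_get_sub_array_sizes (k : Int) : List Int → List Int
  | [] => []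
  | x :: xs =>
      if x < k then
        let run := (x :: xs).takeWhile (fun v => decide (v < k))
        (run.length : Int) :: goB_get_sub_array_sizes k ((x :: xs).drop run.length)
      else goB_get_sub_array_sizes k xs
  termination_by l => l.length
  decreasing_by
    · simp_all [List.length_drop]
    · simp

def get_sub_array_sizes_alt (a : List Int) (k : Int) : List Int :=
  goB_get_sub_array_sizes k a

-- ===== PRECONDITION & SPEC =====
def Spec_get_sub_array_sizes (a : List Int) (k : Int) (out : List Int) : Prop := out = get_sub_array_sizes_alt a k
instance (a : List Int) (k : Int) (out : List Int) : Decidable (Spec_get_sub_array_sizes a k out) := by unfold Spec_get_sub_array_sizes; infer_instance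

-- ===== CLAIM (what is proved, stated in full; the proofs are below) =====
def Claim_equal_get_sub_array_sizes : Prop := ∀ (a : List Int) (k : Int), Dom_get_sub_array_sizes a k → Spec_get_sub_array_sizes a k (get_sub_array_sizes a k)

-- ===== LEMMAS AND PROOFS =====

theorem dropWhile_eq_drop_takeWhile {α : Type} (p : α → Bool) :
    ∀ l : List α, l.dropWhile p = l.drop (l.takeWhile p).length := by
  intro l
  induction l with
  | nil => simp
  | cons x xs ih =>
      by_cases hx : p x = true <;>
        simp [hx, ih]

-- mid-run: A's counter c > 0 emits c plus the length of the remaining run, then continues after the run.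
theorem goA_run (k : Int) (a : List Int) (c : Int) (hc : 0 < c) :
    goA_get_sub_array_sizes k a c =
      (c + ((a.takeWhile (fun v => decide (v < k))).length : Int)) ::
        goA_get_sub_array_sizes k (a.dropWhile (fun v => decide (v < k))) 0 := by
  induction a generalizing c with
  | nil => simp [goA_get_sub_array_sizes]; omega
  | cons x xs ih =>
      by_cases hx : x < k
      · simp [goA_get_sub_array_sizes, hx, ih (c + 1) (by omega)]
        ring
      · simp [goA_get_sub_array_sizes, hx, hc]

theorem goA_eq_goB (k : Int) : ∀ (n : ℕ) (a : List Int), a.length ≤ n →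
    goA_get_sub_array_sizes k a 0 = goB_get_sub_array_sizes k a := by
  intro n
  induction n with
  | zero =>
      intro a ha
      have : a = [] := List.eq_nil_of_length_eq_zero (Nat.le_zero.mp ha)
      subst this
      simp [goA_get_sub_array_sizes, goB_get_sub_array_sizes]
  | succ n ih =>
      intro a ha
      match a with
      | [] => simp [goA_get_sub_array_sizes, goB_get_sub_array_sizes]
      | x :: xs =>
        by_cases hx : x < k
        · have hrun : goA_get_sub_array_sizes k (x :: xs) 0 =
              (0 + (((x :: xs).takeWhile (fun v => decide (v < k))).length : Int)) ::
                goA_get_sub_array_sizes k ((x :: xs).dropWhile (fun v => decide (v < k))) 0 := by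
            have := goA_run k xs (1 : Int) (by omega)
            simp [goA_get_sub_array_sizes, hx, this]
            ring
          rw [hrun, ih _ (by
            have := List.length_dropWhile_le (fun v => decide (v < k)) xs
            simp [hx] at *
            omega)]
          simp [goB_get_sub_array_sizes, hx, ← dropWhile_eq_drop_takeWhile]
        · have : goA_get_sub_array_sizes k (x :: xs) 0 = goA_get_sub_array_sizes k xs 0 := by
            simp [goA_get_sub_array_sizes, hx]
          rw [this, ih xs (by simpa using Nat.lt_succ_iff.mp (by simpa using ha))]
          simp [goB_get_sub_array_sizes, hx]

-- ===== VERDICT (by name: the statement is the Claim_ definition above) =====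
theorem get_sub_array_sizes_spec : Claim_equal_get_sub_array_sizes := by
  intro a k _
  unfold Spec_get_sub_array_sizes get_sub_array_sizes get_sub_array_sizes_alt
  exact goA_eq_goB k a.length a (le_refl _)
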